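-- pv_equiv track=rewrite | github.com/DragunWF/Competitive-Programming | CodeWars/python/7_kyu/max_min_arrays.py | solve
-- ===== SOURCE A (Python) =====
-- def solve(arr: list[int]):
--     current = [*arr]
--     output = []
--     is_max = True  # For alternating
--     while current:
--         selected = max(current) if is_max else min(current)
--         output.append(current.pop(current.index(selected)))
--         is_max = not is_max
--     return output
-- ===== SOURCE B (Python) =====
-- def solve(arr: list[int]):
--     s = sorted(arr)
--     out = []
--     i, j = 0, len(s) - 1
--     take_max = True
--     while i <= j:
--         if take_max:
--             out.append(s[j])
--             j -= 1
--         else: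
--             out.append(s[i])
--             i += 1
--         take_max = not take_max
--     return out
-- ===== Notes on version B (the rewrite author's own statement) =====
-- stated objective: faster
-- what changed: Replaces A's O(n^2) loop of repeated max/min scans with pop by one sort followed by a two-pointer pass taking elements alternately from the high and low ends.
import Mathlib
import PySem

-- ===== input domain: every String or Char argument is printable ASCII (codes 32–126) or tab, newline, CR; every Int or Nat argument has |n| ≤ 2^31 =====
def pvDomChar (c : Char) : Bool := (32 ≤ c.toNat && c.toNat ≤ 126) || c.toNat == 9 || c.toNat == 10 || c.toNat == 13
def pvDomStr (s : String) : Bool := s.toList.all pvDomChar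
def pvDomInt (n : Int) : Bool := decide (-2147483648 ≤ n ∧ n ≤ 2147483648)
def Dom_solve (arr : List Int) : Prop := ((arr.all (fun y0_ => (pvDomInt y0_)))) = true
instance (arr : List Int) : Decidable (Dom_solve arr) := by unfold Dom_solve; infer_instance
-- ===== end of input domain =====

-- B replaces A's repeated max/min-search-and-pop loop with one sort and a
-- two-pointer scan alternating from the high and low ends (objective: faster).

-- ===== PORT A =====
-- literal port of A's while-loop: select max (resp. min), pop its first index.
def solveLoopA (current : List Int) (isMax : Bool) : List Int :=
  if _hne : current = [] then []
  else
    -- selected = max(current) if is_max else min(current), inlined at its single use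
    match h : PySem.List.pop? current (((PySem.List.index? current
        (if isMax then (PySem.List.max? current (fun y => y)).getD 0
         else (PySem.List.min? current (fun y => y)).getD 0)).getD 0 : Nat) : Int) with
    | none => []   -- unreachable: selected ∈ current, so the index is in range
    | some (v, rest) => v :: solveLoopA rest (!isMax)
termination_by current.length
decreasing_by
  have := PySem.List.length_of_pop?_eq_some current h
  simp only [] at this
  omega

def solve (arr : List Int) : List Int := solveLoopA arr true

-- ===== PORT B =====
-- port of Source B: walk the sorted list from both ends, taking the high end on
-- 'take_max' steps (s[j], j -= 1 ↦ getLast/dropLast) and the low end otherwise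
-- (s[i], i += 1 ↦ head/tail).
def pickAlt (isMax : Bool) (s : List Int) : List Int :=
  match s with
  | [] => []
  | x :: t =>
    if isMax then (x :: t).getLast (by simp) :: pickAlt false (x :: t).dropLast
    else x :: pickAlt true t
termination_by s.length
decreasing_by
  all_goals simp [List.length_dropLast]

def solve_alt (arr : List Int) : List Int :=
  pickAlt true (PySem.List.sorted arr (fun y => y) false)

-- ===== PRECONDITION & SPEC =====
def Spec_solve (arr : List Int) (out : List Int) : Prop := out = solve_alt arr
instance (arr : List Int) (out : List Int) : Decidable (Spec_solve arr out) := by unfold Spec_solve; infer_instance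

-- ===== CLAIM (what is proved, stated in full; the proofs are below) =====
def Claim_equal_solve : Prop := ∀ (arr : List Int), Dom_solve arr → Spec_solve arr (solve arr)

-- ===== LEMMAS AND PROOFS =====

-- every element of a ≤-sorted list is at most its last element
lemma le_getLast_of_sorted (s : List Int) (hs : s.Pairwise (· ≤ ·)) (hne : s ≠ [])
    (y : Int) (hy : y ∈ s) : y ≤ s.getLast hne := by
  induction s with
  | nil => simp at hy
  | cons a t ih =>
    cases t with
    | nil => simp at hy; simp [hy, List.getLast]
    | cons b u =>
      rcases List.mem_cons.mp hy with rfl | hyt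
      · have hmem := List.getLast_mem (l := b :: u) (by simp)
        have := (List.pairwise_cons.mp hs).1 _ hmem
        simpa [List.getLast] using this
      · have := ih (List.pairwise_cons.mp hs).2 (by simp) hyt
        simpa [List.getLast] using this

-- popping at the first index of a member v yields (v, erase v)
lemma pop_index_eq (cur : List Int) (v : Int) (hv : v ∈ cur) :
    PySem.List.pop? cur (((PySem.List.index? cur v).getD 0 : Nat) : Int)
      = some (v, cur.erase v) := by
  obtain ⟨k, hk⟩ := Option.isSome_iff_exists.mp
    ((PySem.List.index?_isSome_iff cur v).mpr hv)
  obtain ⟨hlt, hget, -⟩ := PySem.List.getElem_of_index?_eq_some hk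
  have hidx : cur.idxOf v = k := by
    have h' := hk
    rw [PySem.List.index?_eq_idxOf?] at h'
    rw [List.idxOf_eq_getD_idxOf?, h']
    rfl
  rw [hk]
  simpa [PySem.List.pop?_natCast cur k hlt, hget] using
    (List.erase_eq_eraseIdx_of_idxOf hidx).symm

-- main invariant: A's loop on any permutation of a sorted list equals B's
-- two-ended walk of that sorted list
lemma loop_eq_pick (s current : List Int) (isMax : Bool)
    (hperm : current.Perm s) (hs : s.Pairwise (· ≤ ·)) :
    solveLoopA current isMax = pickAlt isMax s := by
  cases hsnil : s with
  | nil =>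
    subst hsnil
    have : current = [] := List.perm_nil.mp hperm
    subst this
    rw [solveLoopA.eq_def, pickAlt.eq_def]
    simp
  | cons a t =>
    subst hsnil
    have hcne : current ≠ [] := by
      intro h; subst h
      have := List.perm_nil.mp hperm.symm
      simp at this
    cases isMax with
    | true =>
      -- selected = max = getLast of the sorted list
      have hne : (a :: t) ≠ [] := by simp
      set m := (a :: t).getLast hne with hm
      have hm_mem_s : m ∈ a :: t := List.getLast_mem hne
      have hm_mem_c : m ∈ current := hperm.mem_iff.mpr hm_mem_s
      obtain ⟨mx, hmx⟩ : ∃ mx, PySem.List.max? current (fun y => y) = some mx := by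
        cases hx : PySem.List.max? current (fun y => y) with
        | none => exact absurd ((PySem.List.max?_eq_none_iff current _).mp hx) hcne
        | some mx => exact ⟨mx, rfl⟩
      have hmx_mem_c : mx ∈ current := PySem.List.max?_mem hmx
      have hmx_eq : mx = m := by
        have h1 : m ≤ mx := PySem.List.max?_isMax hmx m hm_mem_c
        have h2 : mx ≤ m :=
          le_getLast_of_sorted (a :: t) hs hne mx (hperm.mem_iff.mp hmx_mem_c)
        exact le_antisymm h2 h1
      -- facts for the recursive call
      have hperm' : (current.erase m).Perm ((a :: t).dropLast) := by
        have h1 : (current.erase m).Perm ((a :: t).erase m) := hperm.erase m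
        have h2 : ((a :: t).dropLast).Perm ((a :: t).erase m) := by
          have hsplit : (a :: t).dropLast ++ [m] = a :: t :=
            List.dropLast_append_getLast hne
          have h3 : (a :: t).Perm (m :: (a :: t).erase m) :=
            List.perm_cons_erase hm_mem_s
          have h4 : ((a :: t).dropLast ++ [m]).Perm (m :: (a :: t).dropLast) :=
            List.perm_append_singleton m ((a :: t).dropLast)
          have h5 : (m :: (a :: t).dropLast).Perm (m :: (a :: t).erase m) := by
            have h6 : (m :: (a :: t).dropLast).Perm (a :: t) := by
              have h7 := h4.symm
              rw [hsplit] at h7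
              exact h7
            exact h6.trans h3
          exact (List.perm_cons m).mp h5
        exact h1.trans h2.symm
      have hs' : ((a :: t).dropLast).Pairwise (· ≤ ·) :=
        hs.sublist (List.dropLast_sublist _)
      -- one step of A's loop
      rw [solveLoopA.eq_def, dif_neg hcne]
      split
      case _ heq =>
        simp only [reduceIte, hmx, Option.getD_some, hmx_eq] at heq
        rw [pop_index_eq current m hm_mem_c] at heq
        simp at heq
      case _ v rest heq =>
        simp only [reduceIte, hmx, Option.getD_some, hmx_eq] at heq
        rw [pop_index_eq current m hm_mem_c] at heq
        obtain ⟨rfl, rfl⟩ := Prod.mk.inj (Option.some.inj heq)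
        -- one step of B's walk, then recurse
        rw [pickAlt.eq_def]
        simp only [reduceIte, Bool.not_true]
        rw [loop_eq_pick ((a :: t).dropLast) (current.erase m) false hperm' hs']
    | false =>
      -- selected = min = head of the sorted list
      have ha_mem_c : a ∈ current := hperm.mem_iff.mpr List.mem_cons_self
      obtain ⟨mn, hmn⟩ : ∃ mn, PySem.List.min? current (fun y => y) = some mn := by
        cases hx : PySem.List.min? current (fun y => y) with
        | none => exact absurd ((PySem.List.min?_eq_none_iff current _).mp hx) hcne
        | some mn => exact ⟨mn, rfl⟩
      have hmn_mem_c : mn ∈ current := PySem.List.min?_mem hmn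
      have hmn_eq : mn = a := by
        have h1 : mn ≤ a := PySem.List.min?_isMin hmn a ha_mem_c
        have h2 : a ≤ mn := by
          rcases List.mem_cons.mp (hperm.mem_iff.mp hmn_mem_c) with rfl | hmem
          · exact le_refl _
          · exact (List.pairwise_cons.mp hs).1 mn hmem
        exact le_antisymm h1 h2
      have hperm' : (current.erase a).Perm t := by
        have h1 : (current.erase a).Perm ((a :: t).erase a) := hperm.erase a
        simpa using h1
      rw [solveLoopA.eq_def, dif_neg hcne]
      split
      case _ heq =>
        simp only [Bool.false_eq_true, reduceIte, hmn, Option.getD_some, hmn_eq] at heq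
        rw [pop_index_eq current a ha_mem_c] at heq
        simp at heq
      case _ v rest heq =>
        simp only [Bool.false_eq_true, reduceIte, hmn, Option.getD_some, hmn_eq] at heq
        rw [pop_index_eq current a ha_mem_c] at heq
        obtain ⟨rfl, rfl⟩ := Prod.mk.inj (Option.some.inj heq)
        rw [pickAlt.eq_def]
        simp only [Bool.false_eq_true, reduceIte, Bool.not_false]
        rw [loop_eq_pick t (current.erase a) true hperm'
          (List.pairwise_cons.mp hs).2]
termination_by s.length
decreasing_by
  all_goals subst hsnil
  all_goals simp [List.length_dropLast]

-- ===== VERDICT (by name: the statement is the Claim_ definition above) =====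
theorem solve_spec : Claim_equal_solve := by
  intro arr _
  unfold Spec_solve solve solve_alt
  exact loop_eq_pick _ _ _ (PySem.List.sorted_perm arr (fun y => y) false).symm
    (PySem.List.sorted_pairwise arr (fun y => y))
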